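-- pv_equiv track=rewrite | github.com/Exiliados/Presencial_DevOps_20240911 | Tarea_presencial.py | sumar_borde
-- ===== SOURCE A (Python) =====
-- def sumar_borde(matriz):
--     filas = len(matriz)
--     columnas = len(matriz[0])
--
--     if filas <= 1 or columnas <= 1:
--         return sum(sum(fila) for fila in matriz)
--
--     suma = 0
--     # Primera fila
--     suma += sum(matriz[0])
--     # Última fila
--     suma += sum(matriz[-1])
--     # Columnas intermedias (excluyendo primera y última fila)
--     for i in range(1, filas - 1):
--         suma += matriz[i][0] + matriz[i][-1]
--
--     return suma
-- ===== SOURCE B (Python) =====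
-- def sumar_borde(matriz):
--     filas = len(matriz)
--     columnas = len(matriz[0])  # kept so the empty matrix raises IndexError, as in the original
--     suma = 0
--     for i, fila in enumerate(matriz):
--         for j, val in enumerate(fila):
--             if i == 0 or i == filas - 1 or j == 0 or j == len(fila) - 1:
--                 suma += val
--     return suma
-- ===== Notes on version B (the rewrite author's own statement) =====
-- stated objective: alternative
-- what changed: B replaces A's special-cased border walk (first row + last row + a loop over the interior rows' two end elements, with a separate full-sum branch for single-row/column matrices) by one uniform full scan of every cell with a border-position test i==0 or i==filas-1 or j==0 or j==len(fila)-1.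
-- outside the precondition, e.g. on sumar_borde([[1, 2], [], [3, 4]]): A raises IndexError, B returns 10; on sumar_borde([[1, 2], [5], [3, 4]]): A returns 20, B returns 15; on sumar_borde([[7], [1, 2, 3], [8]]): A returns 21, B returns 19
import Mathlib
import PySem

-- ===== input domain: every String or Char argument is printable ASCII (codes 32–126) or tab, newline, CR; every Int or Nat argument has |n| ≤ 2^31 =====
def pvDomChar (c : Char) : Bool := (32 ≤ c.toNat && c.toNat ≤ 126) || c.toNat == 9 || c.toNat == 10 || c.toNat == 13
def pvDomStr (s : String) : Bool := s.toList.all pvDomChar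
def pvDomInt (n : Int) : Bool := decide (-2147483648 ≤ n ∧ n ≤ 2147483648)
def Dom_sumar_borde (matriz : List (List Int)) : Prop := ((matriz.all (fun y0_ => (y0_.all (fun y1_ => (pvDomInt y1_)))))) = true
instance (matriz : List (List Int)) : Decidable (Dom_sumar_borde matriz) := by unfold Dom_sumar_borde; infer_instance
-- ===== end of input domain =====

-- B: one uniform full scan with a border-position test instead of A's special-cased walk
-- over first row, last row and the interior rows' two end elements; same cost class.


-- ===== PORT A =====
def sumar_borde (matriz : List (List Int)) : Int :=
  let filas : Int := matriz.length
  let columnas : Int := (PySem.List.pyGetD matriz 0 []).length  -- matriz[0]; [] raises, excluded by Pre_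
  if filas ≤ 1 ∨ columnas ≤ 1 then
    (matriz.map (fun fila => fila.sum)).sum
  else
    let suma : Int := 0
    let suma := suma + (PySem.List.pyGetD matriz 0 []).sum
    let suma := suma + (PySem.List.pyGetD matriz (-1) []).sum
    (PySem.List.pyRange 1 (filas - 1) 1).foldl
      (fun s i =>
        s + PySem.List.pyGetD (PySem.List.pyGetD matriz i []) 0 0     -- matriz[i][0]; empty row raises, excluded by Pre_
          + PySem.List.pyGetD (PySem.List.pyGetD matriz i []) (-1) 0) -- matriz[i][-1]
      suma

-- ===== PORT B =====
def sumar_borde_alt (matriz : List (List Int)) : Int :=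
  let filas : Int := matriz.length
  let _columnas : Int := (PySem.List.pyGetD matriz 0 []).length  -- kept so the empty matrix raises as in A; excluded by Pre_
  (PySem.List.enumerate matriz).foldl
    (fun suma p =>
      (PySem.List.enumerate p.2).foldl
        (fun s q =>
          if p.1 = 0 ∨ p.1 = filas - 1 ∨ q.1 = 0 ∨ q.1 = (p.2.length : Int) - 1
          then s + q.2 else s)
        suma)
    0

-- ===== PRECONDITION & SPEC =====
-- Pre_ excludes the empty matrix (A raises IndexError) and jagged corners where A's shape tests,
-- keyed to len(matriz[0]), are accidental: an interior row shorter than 2 elements when the first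
-- row has >= 2 (A raises on an empty interior row and double-counts a one-element one), and an
-- interior row longer than 2 when the first row has <= 1 (A then silently sums interior cells).
def Pre_sumar_borde (matriz : List (List Int)) : Prop :=
  matriz ≠ [] ∧ ∀ r ∈ matriz.tail.dropLast,
    (matriz.headI.length ≤ 1 → r.length ≤ 2) ∧ (2 ≤ matriz.headI.length → 2 ≤ r.length)
instance (matriz : List (List Int)) : Decidable (Pre_sumar_borde matriz) := by
  unfold Pre_sumar_borde; infer_instance
def pvWitness_sumar_borde : List (List Int) := [[1, 2, 3], [4, 5, 6], [7, 8, 9]]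
def Spec_sumar_borde (matriz : List (List Int)) (out : Int) : Prop := out = sumar_borde_alt matriz
instance (matriz : List (List Int)) (out : Int) : Decidable (Spec_sumar_borde matriz out) := by unfold Spec_sumar_borde; infer_instance

-- ===== CLAIM (what is proved, stated in full; the proofs are below) =====
def Claim_equal_sumar_borde : Prop := ∀ (matriz : List (List Int)), Dom_sumar_borde matriz → Pre_sumar_borde matriz → Spec_sumar_borde matriz (sumar_borde matriz)

-- ===== LEMMAS AND PROOFS =====

-- value B's inner loop contributes for row `fila` at row index `i` of an `n`-row matrix
def rowVal (i n : Int) (fila : List Int) : Int :=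
  ((PySem.List.enumerate fila).map
    (fun q => if i = 0 ∨ i = n - 1 ∨ q.1 = 0 ∨ q.1 = (fila.length : Int) - 1 then q.2 else 0)).sum

theorem enum_append {α : Type} (xs ys : List α) (s : Int) :
    PySem.List.enumerate (xs ++ ys) s
      = PySem.List.enumerate xs s ++ PySem.List.enumerate ys (s + xs.length) := by
  induction xs generalizing s with
  | nil => simp [PySem.List.enumerate_nil]
  | cons x xs ih =>
      rw [List.cons_append, PySem.List.enumerate_cons, PySem.List.enumerate_cons, ih]
      have : s + 1 + (xs.length : Int) = s + ((x :: xs).length : Int) := by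
        simp only [List.length_cons]; push_cast; omega
      rw [this]
      rfl

theorem mem_enum_bounds {α : Type} {xs : List α} {s : Int} {p : Int × α}
    (h : p ∈ PySem.List.enumerate xs s) :
    s ≤ p.1 ∧ p.1 < s + xs.length ∧ p.2 ∈ xs := by
  induction xs generalizing s with
  | nil => simp [PySem.List.enumerate_nil] at h
  | cons x xs ih =>
      rw [PySem.List.enumerate_cons, List.mem_cons] at h
      rcases h with rfl | h
      · refine ⟨le_refl _, by simp only [List.length_cons]; push_cast; omega, List.mem_cons_self⟩
      · obtain ⟨h1, h2, h3⟩ := ih h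
        refine ⟨by omega, by simp only [List.length_cons] at h2 ⊢; push_cast at h2 ⊢; omega, List.mem_cons_of_mem _ h3⟩

theorem inner_foldl_eq (fila : List Int) (i n s0 : Int) :
    (PySem.List.enumerate fila).foldl
      (fun s q => if i = 0 ∨ i = n - 1 ∨ q.1 = 0 ∨ q.1 = (fila.length : Int) - 1
                  then s + q.2 else s) s0
      = s0 + rowVal i n fila := by
  have hf : (fun (s : Int) (q : Int × Int) =>
        if i = 0 ∨ i = n - 1 ∨ q.1 = 0 ∨ q.1 = (fila.length : Int) - 1 then s + q.2 else s)
      = fun s q => s + (if i = 0 ∨ i = n - 1 ∨ q.1 = 0 ∨ q.1 = (fila.length : Int) - 1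
                        then q.2 else 0) := by
    funext s q; split_ifs <;> simp
  rw [hf, PySem.List.foldl_add]
  rfl

theorem rowVal_border {i n : Int} (fila : List Int) (h : i = 0 ∨ i = n - 1) :
    rowVal i n fila = fila.sum := by
  unfold rowVal
  have hc : ∀ q ∈ PySem.List.enumerate fila,
      (if i = 0 ∨ i = n - 1 ∨ q.1 = 0 ∨ q.1 = (fila.length : Int) - 1 then q.2 else 0) = q.2 :=
    fun q _ => if_pos (by tauto)
  rw [List.map_congr_left hc, PySem.List.map_snd_enumerate]

theorem sum_enum_ite (P : Int → Prop) [DecidablePred P] (xs : List Int) (s : Int)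
    (hz : ∀ j, s ≤ j → j < s + xs.length → ¬ P j) :
    ((PySem.List.enumerate xs s).map (fun q => if P q.1 then q.2 else 0)).sum = 0 := by
  induction xs generalizing s with
  | nil => simp [PySem.List.enumerate_nil]
  | cons x xs ih =>
      rw [PySem.List.enumerate_cons]
      simp only [List.map_cons, List.sum_cons]
      rw [if_neg (hz s le_rfl (by simp only [List.length_cons]; push_cast; omega)),
        ih (s + 1) (fun j h1 h2 => hz j (by omega)
          (by simp only [List.length_cons] at *; push_cast at *; omega))]
      simp

theorem rowVal_short {i n : Int} (fila : List Int) (h : fila.length ≤ 2) :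
    rowVal i n fila = fila.sum := by
  match fila, h with
  | [], _ => simp [rowVal, PySem.List.enumerate_nil]
  | [a], _ => simp [rowVal, PySem.List.enumerate_cons, PySem.List.enumerate_nil]
  | [a, b], _ => norm_num [rowVal, PySem.List.enumerate_cons, PySem.List.enumerate_nil]

theorem rowVal_mid {i n : Int} (fila : List Int) (h2 : 2 ≤ fila.length)
    (hi0 : i ≠ 0) (hin : i ≠ n - 1) :
    rowVal i n fila = fila.headI + fila.getLastD 0 := by
  match fila, h2 with
  | a :: t, hlen =>
    have ht : t ≠ [] := by rintro rfl; simp at hlen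
    obtain ⟨mid, b, rfl⟩ : ∃ mid b, t = mid ++ [b] :=
      ⟨t.dropLast, t.getLast ht, (List.dropLast_append_getLast ht).symm⟩
    unfold rowVal
    rw [PySem.List.enumerate_cons, enum_append]
    simp only [List.map_cons, List.map_append, List.sum_cons, List.sum_append]
    rw [sum_enum_ite (fun j => i = 0 ∨ i = n - 1 ∨ j = 0 ∨
          j = (((a :: (mid ++ [b])).length : Int)) - 1) mid (0 + 1)
        (by intro j h1 h2 hP
            simp only [List.length_cons, List.length_append] at h2 hP
            push_cast at h2 hP
            omega)]
    rw [PySem.List.enumerate_cons, PySem.List.enumerate_nil]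
    simp only [List.map_cons, List.map_nil, List.sum_cons, List.sum_nil]
    simp only [true_or, or_true, if_true]
    rw [if_pos (Or.inr (Or.inr (Or.inr (by
          simp only [List.length_cons, List.length_append, List.length_nil]
          push_cast; omega : (0:Int) + 1 + (mid.length : Int) = ((a :: (mid ++ [b])).length : Int) - 1))))]
    have hb : (a :: (mid ++ [b])).getLastD 0 = b := by
      rw [← List.cons_append]; exact List.getLastD_concat
    simp only [List.headI_cons, hb]
    ring


theorem alt_eq_sum (m : List (List Int)) :
    sumar_borde_alt m
      = ((PySem.List.enumerate m).map (fun p => rowVal p.1 (m.length : Int) p.2)).sum := by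
  unfold sumar_borde_alt
  have hf : (fun (suma : Int) (p : Int × List Int) =>
      (PySem.List.enumerate p.2).foldl
        (fun s q =>
          if p.1 = 0 ∨ p.1 = ((m.length : Int)) - 1 ∨ q.1 = 0 ∨ q.1 = (p.2.length : Int) - 1
          then s + q.2 else s) suma)
      = fun suma p => suma + rowVal p.1 (m.length : Int) p.2 := by
    funext suma p; exact inner_foldl_eq p.2 p.1 (m.length : Int) suma
  simp only []
  rw [hf, PySem.List.foldl_add]
  simp


theorem map_range_getD {α β : Type} (l : List α) (d : α) (f : α → β) :
    (List.range l.length).map (fun k => f (l.getD k d)) = l.map f := by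
  apply List.ext_getElem (by simp)
  intro i h1 h2
  have hi : i < l.length := by simpa using h2
  simp [List.getD_eq_getElem?_getD, List.getElem?_eq_getElem hi]

theorem pyGetD_zero_headI (r : List Int) (hr : r ≠ []) :
    PySem.List.pyGetD r 0 0 = r.headI := by
  cases r with
  | nil => exact absurd rfl hr
  | cons a s => rw [PySem.List.pyGetD_zero_cons]; rfl

theorem pyGetD_neg_one_getLastD (r : List Int) (hr : r ≠ []) :
    PySem.List.pyGetD r (-1) 0 = r.getLastD 0 := by
  rw [PySem.List.pyGetD_neg_one r 0 hr]
  rw [List.getLastD_eq_getLast?, List.getLast?_eq_some_getLast hr]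
  rfl

theorem mid_sum_short (mid : List (List Int)) (n : Int)
    (h : ∀ r ∈ mid, r.length ≤ 2) :
    ((PySem.List.enumerate mid 1).map (fun p => rowVal p.1 n p.2)).sum
      = (mid.map (fun r => r.sum)).sum := by
  have hc : ∀ p ∈ PySem.List.enumerate mid 1,
      rowVal p.1 n p.2 = p.2.sum := by
    intro p hp
    exact rowVal_short p.2 (h p.2 (mem_enum_bounds hp).2.2)
  rw [List.map_congr_left hc,
    show (fun (p : Int × List Int) => p.2.sum)
      = (fun r : List Int => r.sum) ∘ Prod.snd from rfl,
    ← List.map_map, PySem.List.map_snd_enumerate]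

theorem mid_sum_edge (mid : List (List Int)) (n : Int) (hn : n = (mid.length : Int) + 2)
    (h : ∀ r ∈ mid, 2 ≤ r.length) :
    ((PySem.List.enumerate mid 1).map (fun p => rowVal p.1 n p.2)).sum
      = (mid.map (fun r => r.headI + r.getLastD 0)).sum := by
  have hc : ∀ p ∈ PySem.List.enumerate mid 1,
      rowVal p.1 n p.2 = p.2.headI + p.2.getLastD 0 := by
    intro p hp
    obtain ⟨h1, h2, h3⟩ := mem_enum_bounds hp
    exact rowVal_mid p.2 (h p.2 h3) (by omega) (by omega)
  rw [List.map_congr_left hc,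
    show (fun (p : Int × List Int) => p.2.headI + p.2.getLastD 0)
      = (fun r : List Int => r.headI + r.getLastD 0) ∘ Prod.snd from rfl,
    ← List.map_map, PySem.List.map_snd_enumerate]

theorem alt_sum_decomp (x y : List Int) (mid : List (List Int)) (n : Int)
    (hn : n = (mid.length : Int) + 2) :
    ((PySem.List.enumerate (x :: (mid ++ [y]))).map (fun p => rowVal p.1 n p.2)).sum
      = x.sum + ((PySem.List.enumerate mid 1).map (fun p => rowVal p.1 n p.2)).sum + y.sum := by
  rw [PySem.List.enumerate_cons, enum_append, PySem.List.enumerate_cons,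
    PySem.List.enumerate_nil]
  simp only [List.map_cons, List.map_append, List.sum_cons, List.sum_append,
    List.map_nil, List.sum_nil]
  rw [rowVal_border x (Or.inl rfl),
    rowVal_border y (Or.inr (by push_cast; omega))]
  ring_nf

-- A's else branch as a sum over the interior rows
theorem a_else_loop (x y : List Int) (mid : List (List Int))
    (hmid : ∀ r ∈ mid, r ≠ []) (suma : Int) :
    (PySem.List.pyRange 1 (((x :: (mid ++ [y])).length : Int) - 1) 1).foldl
      (fun s i =>
        s + PySem.List.pyGetD (PySem.List.pyGetD (x :: (mid ++ [y])) i []) 0 0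
          + PySem.List.pyGetD (PySem.List.pyGetD (x :: (mid ++ [y])) i []) (-1) 0)
      suma
    = suma + (mid.map (fun r => r.headI + r.getLastD 0)).sum := by
  have hb : (fun (s : Int) (i : Int) =>
      s + PySem.List.pyGetD (PySem.List.pyGetD (x :: (mid ++ [y])) i []) 0 0
        + PySem.List.pyGetD (PySem.List.pyGetD (x :: (mid ++ [y])) i []) (-1) 0)
      = fun s i => s + (PySem.List.pyGetD (PySem.List.pyGetD (x :: (mid ++ [y])) i []) 0 0
        + PySem.List.pyGetD (PySem.List.pyGetD (x :: (mid ++ [y])) i []) (-1) 0) := by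
    funext s i; omega
  rw [hb, PySem.List.foldl_add]
  congr 1
  have hlen : ((x :: (mid ++ [y])).length : Int) - 1 = (mid.length : Int) + 1 := by
    simp only [List.length_cons, List.length_append, List.length_nil]
    push_cast; omega
  rw [hlen, PySem.List.pyRange_one]
  have htn : ((mid.length : Int) + 1 - 1).toNat = mid.length := by omega
  rw [htn, List.map_map]
  have hg : ∀ k ∈ List.range mid.length,
      ((fun i => PySem.List.pyGetD (PySem.List.pyGetD (x :: (mid ++ [y])) i []) 0 0
        + PySem.List.pyGetD (PySem.List.pyGetD (x :: (mid ++ [y])) i []) (-1) 0) ∘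
        (fun k : Nat => (1 : Int) + k)) k
      = (fun r : List Int => r.headI + r.getLastD 0) (mid.getD k []) := by
    intro k hk
    have hk' : k < mid.length := List.mem_range.mp hk
    have hcast : (1 : Int) + (k : Nat) = ((k + 1 : Nat) : Int) := by push_cast; omega
    have hrow : PySem.List.pyGetD (x :: (mid ++ [y])) ((1 : Int) + (k : Nat)) [] = mid.getD k [] := by
      rw [hcast, PySem.List.pyGetD_natCast]
      rw [List.getD_cons_succ]
      rw [List.getD_append _ _ _ _ hk']
    have hmem : mid.getD k [] ∈ mid := by
      rw [List.getD_eq_getElem mid [] hk']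
      exact List.getElem_mem hk'
    have hne : mid.getD k [] ≠ [] := hmid _ hmem
    simp only [Function.comp, hrow]
    rw [pyGetD_zero_headI _ hne, pyGetD_neg_one_getLastD _ hne]
  rw [List.map_congr_left hg,
    map_range_getD mid [] (fun r : List Int => r.headI + r.getLastD 0)]

-- ===== VERDICT (by name: the statement is the Claim_ definition above) =====
theorem sumar_borde_spec : Claim_equal_sumar_borde := by
  intro m _ pre
  obtain ⟨hne, hrows⟩ := pre
  unfold Spec_sumar_borde
  rw [alt_eq_sum]
  cases m with
  | nil => exact absurd rfl hne
  | cons x rest =>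
    cases rest with
    | nil =>
        rw [PySem.List.enumerate_cons, PySem.List.enumerate_nil]
        simp only [List.map_cons, List.map_nil, List.sum_cons, List.sum_nil]
        rw [rowVal_border x (Or.inl rfl)]
        unfold sumar_borde
        rw [if_pos (Or.inl (by simp))]
        simp
    | cons r2 rest2 =>
        have ht : r2 :: rest2 ≠ [] := List.cons_ne_nil _ _
        obtain ⟨mid, y, hty⟩ : ∃ mid y, r2 :: rest2 = mid ++ [y] :=
          ⟨(r2 :: rest2).dropLast, (r2 :: rest2).getLast ht,
            (List.dropLast_append_getLast ht).symm⟩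
        rw [hty]
        have hn : ((x :: (mid ++ [y])).length : Int) = (mid.length : Int) + 2 := by
          simp only [List.length_cons, List.length_append, List.length_nil]
          push_cast; omega
        have hmid : ∀ r ∈ mid, (x.length ≤ 1 → r.length ≤ 2) ∧ (2 ≤ x.length → 2 ≤ r.length) := by
          intro r hr
          have : r ∈ (x :: (r2 :: rest2)).tail.dropLast := by
            rw [List.tail_cons, hty, List.dropLast_concat]
            exact hr
          exact hrows r this
        rw [alt_sum_decomp x y mid _ hn]
        by_cases hw : x.length ≤ 1
        · have hcond : ((x :: (mid ++ [y])).length : Int) ≤ 1 ∨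
              ((PySem.List.pyGetD (x :: (mid ++ [y])) 0 []).length : Int) ≤ 1 :=
            Or.inr (by rw [PySem.List.pyGetD_zero_cons]; omega)
          unfold sumar_borde
          rw [if_pos hcond]
          rw [mid_sum_short mid _ (fun r hr => (hmid r hr).1 hw)]
          simp only [List.map_cons, List.map_append, List.sum_cons, List.sum_append,
            List.map_nil, List.sum_nil]
          ring
        · have hx2 : 2 ≤ x.length := by omega
          have h2 : ∀ r ∈ mid, 2 ≤ r.length := fun r hr => (hmid r hr).2 hx2
          rw [mid_sum_edge mid _ hn h2]
          unfold sumar_borde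
          rw [if_neg (by
            rw [PySem.List.pyGetD_zero_cons]
            simp only [List.length_cons, List.length_append, List.length_nil]
            push_cast
            omega)]
          simp only [PySem.List.pyGetD_zero_cons]
          rw [show (x :: (mid ++ [y])) = (x :: mid) ++ [y] from rfl,
            PySem.List.pyGetD_neg_one_append_singleton]
          rw [show ((x :: mid) ++ [y] : List (List Int)) = x :: (mid ++ [y]) from rfl]
          rw [a_else_loop x y mid (fun r hr => by
            have := h2 r hr
            intro hnil
            rw [hnil] at this
            simp at this)]
          ring
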